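-- pv_equiv track=rewrite | github.com/ddmitrii-ai/TOKEN | update_token_map_from_listedon.py | choose_chain_and_address
-- ===== SOURCE A (Python) =====
-- from typing import Dict, List, Optional, Set, Tuple
--
-- ALLOWED_CHAINS = {"ethereum", "bnb", "solana"}
--
-- PLATFORM_TO_CHAIN = {
--     "ethereum": "ethereum",
--     "eth": "ethereum",
--
--     "binance-smart-chain": "bnb",
--     "bnb-smart-chain": "bnb",
--     "bsc": "bnb",
--
--     "solana": "solana",
-- }
--
-- def choose_chain_and_address(platforms: Dict[str, str]) -> Optional[Tuple[str, str]]: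
--     """
--     platforms: {"ethereum": "0x...", "solana": "...", ...}
--     Возвращаем (chain, address) или None.
--     """
--     if not platforms:
--         return None
--
--     priority = ["bnb", "ethereum", "solana"]
--
--     candidates: List[Tuple[str, str]] = []
--     for plat_name, addr in platforms.items():
--         if not addr:
--             continue
--         chain = PLATFORM_TO_CHAIN.get(plat_name.lower())
--         if chain in ALLOWED_CHAINS:
--             candidates.append((chain, addr))
--
--     if not candidates:
--         return None
--
--     for ch in priority:
--         for chain, addr in candidates:
--             if chain == ch:
--                 return chain, addr
--
--     return candidates[0]
-- ===== SOURCE B (Python) =====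
-- PLATFORM_TO_CHAIN = {
--     "ethereum": "ethereum",
--     "eth": "ethereum",
--     "binance-smart-chain": "bnb",
--     "bnb-smart-chain": "bnb",
--     "bsc": "bnb",
--     "solana": "solana",
-- }
--
-- RANK = {"bnb": 0, "ethereum": 1, "solana": 2}
--
-- def choose_chain_and_address(platforms):
--     # single pass: keep the best (lowest-rank) candidate seen so far;
--     # strict '<' keeps the FIRST address of the winning chain, like A's scan
--     best = None  # (rank, chain, addr)
--     for plat_name, addr in platforms.items():
--         if not addr:
--             continue
--         chain = PLATFORM_TO_CHAIN.get(plat_name.lower())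
--         if chain is None:
--             continue
--         r = RANK[chain]
--         if best is None or r < best[0]:
--             best = (r, chain, addr)
--     return None if best is None else (best[1], best[2])
-- ===== Notes on version B (the rewrite author's own statement) =====
-- stated objective: alternative
-- what changed: B replaces A's two-phase algorithm (collect a candidate list, then rescan it once per priority chain with a fallback) by a single-pass argmin fold: one best (rank, chain, addr) triple kept under a numeric rank table, updated on strict rank improvement, with no intermediate collection and no second loop.
import Mathlib
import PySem

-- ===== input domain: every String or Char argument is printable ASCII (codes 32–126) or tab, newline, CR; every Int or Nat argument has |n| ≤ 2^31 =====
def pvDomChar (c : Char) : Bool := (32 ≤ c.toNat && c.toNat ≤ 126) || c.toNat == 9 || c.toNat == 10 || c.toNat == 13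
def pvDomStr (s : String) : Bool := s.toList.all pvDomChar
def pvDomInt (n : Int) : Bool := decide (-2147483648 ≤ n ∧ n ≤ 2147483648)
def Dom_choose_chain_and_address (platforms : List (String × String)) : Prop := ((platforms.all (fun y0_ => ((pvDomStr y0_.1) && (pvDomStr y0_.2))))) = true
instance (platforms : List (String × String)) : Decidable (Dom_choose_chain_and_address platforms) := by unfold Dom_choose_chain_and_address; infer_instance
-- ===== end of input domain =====

-- B replaces A's candidate list plus per-priority rescans by a single-pass argmin fold
-- over a numeric rank table (objective: alternative; return value only).

-- ===== PORT A =====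
def PLATFORM_TO_CHAIN : PySem.Dict String String :=
  PySem.Dict.ofList [("ethereum", "ethereum"), ("eth", "ethereum"),
    ("binance-smart-chain", "bnb"), ("bnb-smart-chain", "bnb"), ("bsc", "bnb"),
    ("solana", "solana")]

def ALLOWED_CHAINS : PySem.Set String := PySem.Set.ofList ["ethereum", "bnb", "solana"]

-- loop body of A's candidate-collecting loop ('chain = None' is never in ALLOWED_CHAINS)
def pvStepA (acc : List (String × String)) (pa : String × String) : List (String × String) :=
  if pa.2 = "" then acc
  else
    match PLATFORM_TO_CHAIN.get? (PySem.Str.lower pa.1) with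
    | some ch => if PySem.Set.contains ALLOWED_CHAINS ch then acc ++ [(ch, pa.2)] else acc
    | none => acc

-- A's 'for ch in priority: for (chain, addr) in candidates: if chain == ch: return …'
def pvScanA : List String → List (String × String) → Option (String × String)
  | [], _ => none
  | ch :: rest, cs =>
    match cs.find? (fun c => c.1 == ch) with
    | some c => some c
    | none => pvScanA rest cs

def choose_chain_and_address (platforms : List (String × String)) : Option (String × String) :=
  if platforms = [] then none
  else
    let candidates := platforms.foldl pvStepA []
    if candidates = [] then none
    else
      match pvScanA ["bnb", "ethereum", "solana"] candidates with
      | some c => some c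
      | none => PySem.List.pyGet? candidates 0   -- candidates[0]

-- ===== PORT B =====
def RANK : PySem.Dict String Int :=
  PySem.Dict.ofList [("bnb", 0), ("ethereum", 1), ("solana", 2)]

-- loop body of B's single argmin pass: keep the lowest-rank candidate seen first
def pvStepB (best : Option (Int × String × String)) (pa : String × String) :
    Option (Int × String × String) :=
  if pa.2 = "" then best
  else
    match PLATFORM_TO_CHAIN.get? (PySem.Str.lower pa.1) with
    | none => best
    | some ch =>
      match RANK.get? ch with
      | none => best  -- unreachable: every PLATFORM_TO_CHAIN value is a RANK key, so RANK[chain] never raises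
      | some r =>
        match best with
        | none => some (r, ch, pa.2)
        | some b => if r < b.1 then some (r, ch, pa.2) else best

def choose_chain_and_address_alt (platforms : List (String × String)) : Option (String × String) :=
  match platforms.foldl pvStepB none with
  | none => none
  | some b => some (b.2.1, b.2.2)

-- ===== PRECONDITION & SPEC =====
def Spec_choose_chain_and_address (platforms : List (String × String)) (out : Option (String × String)) : Prop := out = choose_chain_and_address_alt platforms
instance (platforms : List (String × String)) (out : Option (String × String)) : Decidable (Spec_choose_chain_and_address platforms out) := by unfold Spec_choose_chain_and_address; infer_instance

-- ===== CLAIM (what is proved, stated in full; the proofs are below) =====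
def Claim_equal_choose_chain_and_address : Prop := ∀ (platforms : List (String × String)), Dom_choose_chain_and_address platforms → Spec_choose_chain_and_address platforms (choose_chain_and_address platforms)

-- ===== LEMMAS AND PROOFS =====

-- B's loop body restricted to an already-mapped candidate pair (ch, addr)
def pvStep' (best : Option (Int × String × String)) (c : String × String) :
    Option (Int × String × String) :=
  match RANK.get? c.1 with
  | none => best
  | some r =>
    match best with
    | none => some (r, c.1, c.2)
    | some b => if r < b.1 then some (r, c.1, c.2) else best

def pvRanked (cs : List (String × String)) : Prop :=
  ∀ x ∈ cs, x.1 = "ethereum" ∨ x.1 = "bnb" ∨ x.1 = "solana"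

-- every value of the literal dict PLATFORM_TO_CHAIN is one of the three chains
theorem pv_pt_values (s ch : String) (h : PLATFORM_TO_CHAIN.get? s = some ch) :
    ch = "ethereum" ∨ ch = "bnb" ∨ ch = "solana" := by
  have hm := PySem.Dict.mem_items_of_get?_eq_some (d := PLATFORM_TO_CHAIN) (k := s) (v := ch) h
  have hit : PLATFORM_TO_CHAIN.items = [("ethereum", "ethereum"), ("eth", "ethereum"),
      ("binance-smart-chain", "bnb"), ("bnb-smart-chain", "bnb"), ("bsc", "bnb"),
      ("solana", "solana")] := by decide
  rw [hit] at hm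
  simp only [List.mem_cons, List.not_mem_nil, or_false, Prod.mk.injEq] at hm
  rcases hm with ⟨_, h2⟩ | ⟨_, h2⟩ | ⟨_, h2⟩ | ⟨_, h2⟩ | ⟨_, h2⟩ | ⟨_, h2⟩ <;> simp [← h2]

theorem pv_allowed_of_pt (s ch : String) (h : PLATFORM_TO_CHAIN.get? s = some ch) :
    PySem.Set.contains ALLOWED_CHAINS ch = true := by
  rcases pv_pt_values s ch h with h1 | h1 | h1 <;> subst h1 <;> decide

-- A's step only appends at the end
theorem pv_stepA_append (acc1 acc2 : List (String × String)) (p : String × String) :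
    pvStepA (acc1 ++ acc2) p = acc1 ++ pvStepA acc2 p := by
  unfold pvStepA
  by_cases h2 : p.2 = ""
  · simp [h2]
  · simp only [if_neg h2]
    cases hpt : PLATFORM_TO_CHAIN.get? (PySem.Str.lower p.1) with
    | none => rfl
    | some ch => by_cases hA : ch ∈ ALLOWED_CHAINS <;> simp [hA, List.append_assoc]

theorem pv_foldA_acc (ps : List (String × String)) :
    ∀ acc, ps.foldl pvStepA acc = acc ++ ps.foldl pvStepA [] := by
  induction ps with
  | nil => intro acc; simp
  | cons p t ih =>
    intro acc
    have h1 : pvStepA acc p = acc ++ pvStepA [] p := by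
      simpa using pv_stepA_append acc [] p
    simp only [List.foldl_cons, h1, ih (acc ++ pvStepA [] p), ih (pvStepA [] p),
      List.append_assoc]

-- B's loop body equals folding pvStep' over A's per-item candidate contribution
theorem pv_stepB_eq (b : Option (Int × String × String)) (p : String × String) :
    pvStepB b p = (pvStepA [] p).foldl pvStep' b := by
  unfold pvStepA pvStepB
  by_cases h2 : p.2 = ""
  · simp [h2]
  · simp only [if_neg h2]
    cases hpt : PLATFORM_TO_CHAIN.get? (PySem.Str.lower p.1) with
    | none => rfl
    | some ch =>
      simp only [pv_allowed_of_pt _ _ hpt, if_true]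
      simp [pvStep']

-- bridge: B's fold over platforms = fold of pvStep' over A's candidate list
theorem pv_bridge (ps : List (String × String)) :
    ∀ b, ps.foldl pvStepB b = (ps.foldl pvStepA []).foldl pvStep' b := by
  induction ps with
  | nil => intro b; rfl
  | cons p t ih =>
    intro b
    rw [List.foldl_cons, List.foldl_cons, pv_stepB_eq, ih, pv_foldA_acc t (pvStepA [] p),
      List.foldl_append]

-- every candidate's chain is one of the three priorities
theorem pv_chains (ps : List (String × String)) :
    ∀ acc, ∀ x ∈ ps.foldl pvStepA acc,
      x ∈ acc ∨ x.1 = "ethereum" ∨ x.1 = "bnb" ∨ x.1 = "solana" := by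
  induction ps with
  | nil => intro acc x hx; exact Or.inl hx
  | cons p t ih =>
    intro acc x hx
    rcases ih (pvStepA acc p) x (by simpa using hx) with hin | hin
    · unfold pvStepA at hin
      by_cases h2 : p.2 = ""
      · simp [h2] at hin; exact Or.inl hin
      · rw [if_neg h2] at hin
        cases hpt : PLATFORM_TO_CHAIN.get? (PySem.Str.lower p.1) with
        | none => rw [hpt] at hin; exact Or.inl hin
        | some ch =>
          rw [hpt] at hin
          simp only [pv_allowed_of_pt _ _ hpt, if_true, List.mem_append,
            List.mem_singleton] at hin
          rcases hin with hin | hin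
          · exact Or.inl hin
          · subst hin; exact Or.inr (pv_pt_values _ _ hpt)
    · exact Or.inr hin

-- a rank-0 best is never displaced
theorem pv_rank_bnb : RANK.get? "bnb" = some 0 := by decide
theorem pv_rank_eth : RANK.get? "ethereum" = some 1 := by decide
theorem pv_rank_sol : RANK.get? "solana" = some 2 := by decide

theorem pv_aux0 (cs : List (String × String)) (hr : pvRanked cs) (c0 : String) (a0 : String) :
    cs.foldl pvStep' (some (0, c0, a0)) = some (0, c0, a0) := by
  induction cs with
  | nil => rfl
  | cons x t ih =>
    have ht : pvRanked t := fun y hy => hr y (List.mem_cons_of_mem _ hy)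
    have hx := hr x List.mem_cons_self
    obtain ⟨x1, x2⟩ := x
    simp only [List.foldl_cons]
    rcases hx with h | h | h <;> simp only at h <;> subst h <;>
      simp [pvStep', pv_rank_bnb, pv_rank_eth, pv_rank_sol, ih ht]

-- a rank-1 best is displaced exactly by the first "bnb" candidate
theorem pv_aux1 (cs : List (String × String)) (hr : pvRanked cs) :
    ∀ c0 a0, cs.foldl pvStep' (some (1, c0, a0)) =
      match cs.find? (fun c => c.1 == "bnb") with
      | some c => some (0, c.1, c.2)
      | none => some (1, c0, a0) := by
  induction cs with
  | nil => intro c0 a0; rfl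
  | cons x t ih =>
    intro c0 a0
    have ht : pvRanked t := fun y hy => hr y (List.mem_cons_of_mem _ hy)
    have hx := hr x List.mem_cons_self
    obtain ⟨x1, x2⟩ := x
    simp only [List.foldl_cons]
    rcases hx with h | h | h <;> simp only at h <;> subst h
    · simp [pvStep', pv_rank_eth, List.find?, ih ht c0 a0]
    · simp [pvStep', pv_rank_bnb, List.find?, pv_aux0 t ht]
    · simp [pvStep', pv_rank_sol, List.find?, ih ht c0 a0]

-- a rank-2 best is displaced by the first "bnb", else the first "ethereum" candidate
theorem pv_aux2 (cs : List (String × String)) (hr : pvRanked cs) :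
    ∀ c0 a0, cs.foldl pvStep' (some (2, c0, a0)) =
      match cs.find? (fun c => c.1 == "bnb") with
      | some c => some (0, c.1, c.2)
      | none =>
        match cs.find? (fun c => c.1 == "ethereum") with
        | some c => some (1, c.1, c.2)
        | none => some (2, c0, a0) := by
  induction cs with
  | nil => intro c0 a0; rfl
  | cons x t ih =>
    intro c0 a0
    have ht : pvRanked t := fun y hy => hr y (List.mem_cons_of_mem _ hy)
    have hx := hr x List.mem_cons_self
    obtain ⟨x1, x2⟩ := x
    simp only [List.foldl_cons]
    rcases hx with h | h | h <;> simp only at h <;> subst h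
    · rw [show pvStep' (some (2, c0, a0)) ("ethereum", x2) = some (1, "ethereum", x2) by
        simp [pvStep', pv_rank_eth], pv_aux1 t ht]
      cases hf : t.find? (fun c => c.1 == "bnb") <;> simp [List.find?, hf]
    · simp [pvStep', pv_rank_bnb, List.find?, pv_aux0 t ht]
    · simp [pvStep', pv_rank_sol, List.find?, ih ht c0 a0]

-- folding from a some-accumulator always yields some
theorem pv_fold_some (t : List (String × String)) :
    ∀ b : Int × String × String, (t.foldl pvStep' (some b)).isSome := by
  induction t with
  | nil => intro b; rfl
  | cons x s ih =>
    intro b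
    simp only [List.foldl_cons]
    unfold pvStep'
    cases RANK.get? x.1 with
    | none => exact ih b
    | some r =>
      by_cases h : r < b.1 <;> simp only [h, ite_true, ite_false] <;> exact ih _

-- main: A's priority scan of the candidate list equals the projection of B's argmin fold
theorem pv_main (cs : List (String × String)) (hr : pvRanked cs) :
    pvScanA ["bnb", "ethereum", "solana"] cs =
      (match cs.foldl pvStep' none with
       | none => none
       | some b => some (b.2.1, b.2.2)) := by
  cases cs with
  | nil => rfl
  | cons x t =>
    have ht : pvRanked t := fun y hy => hr y (List.mem_cons_of_mem _ hy)
    have hx := hr x List.mem_cons_self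
    obtain ⟨x1, x2⟩ := x
    simp only [List.foldl_cons]
    rcases hx with h | h | h <;> simp only at h <;> subst h
    · rw [show pvStep' none ("ethereum", x2) = some (1, "ethereum", x2) by
        simp [pvStep', pv_rank_eth], pv_aux1 t ht]
      cases hf : t.find? (fun c => c.1 == "bnb") <;>
        simp [pvScanA, List.find?, hf]
    · rw [show pvStep' none ("bnb", x2) = some (0, "bnb", x2) by
        simp [pvStep', pv_rank_bnb], pv_aux0 t ht]
      simp [pvScanA, List.find?]
    · rw [show pvStep' none ("solana", x2) = some (2, "solana", x2) by
        simp [pvStep', pv_rank_sol], pv_aux2 t ht]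
      cases hf : t.find? (fun c => c.1 == "bnb") with
      | some c => simp [pvScanA, List.find?, hf]
      | none =>
        cases hf2 : t.find? (fun c => c.1 == "ethereum") <;>
          simp [pvScanA, List.find?, hf, hf2]

-- ===== VERDICT (by name: the statement is the Claim_ definition above) =====
theorem choose_chain_and_address_spec : Claim_equal_choose_chain_and_address := by
  intro platforms _
  unfold Spec_choose_chain_and_address choose_chain_and_address choose_chain_and_address_alt
  rw [pv_bridge platforms none]
  have hr : pvRanked (platforms.foldl pvStepA []) := fun x hx =>
    (pv_chains platforms [] x hx).resolve_left (by simp)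
  by_cases hp : platforms = []
  · subst hp; rfl
  · simp only [if_neg hp]
    by_cases hc : platforms.foldl pvStepA [] = []
    · simp [hc]
    · simp only [if_neg hc]
      rw [← pv_main _ hr]
      cases hs : pvScanA ["bnb", "ethereum", "solana"] (platforms.foldl pvStepA []) with
      | some c => rfl
      | none =>
        exfalso
        rw [pv_main _ hr] at hs
        cases hcs : platforms.foldl pvStepA [] with
        | nil => exact hc hcs
        | cons y ys =>
          rw [hcs] at hs
          simp only [List.foldl_cons] at hs
          have hy : pvRanked (y :: ys) := hcs ▸ hr
          have hsome : (pvStep' none y).isSome := by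
            rcases hy y List.mem_cons_self with h | h | h <;>
              simp [pvStep', h, pv_rank_bnb, pv_rank_eth, pv_rank_sol]
          cases he : pvStep' none y with
          | none => rw [he] at hsome; exact absurd hsome (by simp)
          | some b =>
            rw [he] at hs
            have := pv_fold_some ys b
            cases hfe : ys.foldl pvStep' (some b) with
            | none => rw [hfe] at this; exact absurd this (by simp)
            | some b2 => rw [hfe] at hs; simp at hs
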